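-- pv_equiv track=rewrite | github.com/RyanDancoes/sudoku | techniques.py | hidden_single
-- ===== SOURCE A (Python) =====
-- def hidden_single(house):
--     total = {}
--     value = 0
--     for num in range(1,10):
--         for key in house:
--             if num in list(house[key].values())[0]:
--                 if num in total:
--                     total[num] += 1
--                 else:
--                     total[num] = 1
--
--     for num in total:
--         if total[num] == 1:
--             value = num
--             break
--     for key in house:
--         if value in list(house[key].values())[0]:
--             return key, value
--
--     return None, None
-- ===== SOURCE B (Python) =====
-- def hidden_single(house):
--     count = {}
--     cell = {}
--     for key in house:
--         for c in dict.fromkeys(list(house[key].values())[0]):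
--             count[c] = count.get(c, 0) + 1
--             cell.setdefault(c, key)
--     value = next((n for n in range(1, 10) if count.get(n) == 1), 0)
--     return (cell[value], value) if value in cell else (None, None)
-- ===== Notes on version B (the rewrite author's own statement) =====
-- stated objective: faster
-- what changed: Instead of A's three phases (a 9x|house| digit-by-cell counting loop into a dict, then a scan for the first count-1 digit, then a final locate pass over the house), B makes ONE pass over the cells building a candidate->count dict and a candidate->first-cell index simultaneously, so the answer comes from a direct index lookup and both the digit-by-digit rescans and the final locate pass disappear.
import Mathlib
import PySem

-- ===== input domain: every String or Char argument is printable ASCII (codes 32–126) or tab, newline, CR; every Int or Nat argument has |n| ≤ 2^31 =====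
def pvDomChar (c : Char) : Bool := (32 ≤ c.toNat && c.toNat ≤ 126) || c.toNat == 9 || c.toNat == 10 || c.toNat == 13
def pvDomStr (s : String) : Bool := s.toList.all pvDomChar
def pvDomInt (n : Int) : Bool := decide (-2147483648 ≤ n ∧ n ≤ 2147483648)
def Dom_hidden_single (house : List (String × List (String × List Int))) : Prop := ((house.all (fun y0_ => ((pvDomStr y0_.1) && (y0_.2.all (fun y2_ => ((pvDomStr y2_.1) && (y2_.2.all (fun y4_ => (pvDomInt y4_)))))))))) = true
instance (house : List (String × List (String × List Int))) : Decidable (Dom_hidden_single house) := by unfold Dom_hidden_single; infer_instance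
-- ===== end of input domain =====

-- B replaces A's digit-by-digit triple scan with ONE pass over the cells building a count dict and a first-cell index, then a direct lookup (alternative decomposition); return values are proved equal wherever the Python returns.


-- ===== PORT A =====
-- list(house[key].values())[0]: first value of the inner dict; exact when the inner dict is
-- nonempty (Pre_ below excludes the empty case, where Python raises IndexError).
def firstCands (inner : List (String × List Int)) : List Int := (inner.map Prod.snd).headD []

-- inner 'for key in house' of the counting loop ('house[key]' is the key's paired value)
def countFold (house : List (String × List (String × List Int))) (num : Int)
    (total : PySem.Dict Int Int) : PySem.Dict Int Int :=
  house.foldl (fun t kv =>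
    if num ∈ firstCands kv.2 then
      if t.contains num then t.insert num (t.getD num 0 + 1) else t.insert num 1
    else t) total

-- 'for num in total: if total[num] == 1: value = num; break' (value was initialised to 0)
def hs_select : List (Int × Int) → Int
  | [] => 0
  | (n, c) :: rest => if c = 1 then n else hs_select rest

-- final 'for key in house: if value in list(house[key].values())[0]: return key, value'
def hs_locate : List (String × List (String × List Int)) → Int → Option String × Option Int
  | [], _ => (none, none)
  | kv :: rest, v => if v ∈ firstCands kv.2 then (some kv.1, some v) else hs_locate rest v

def hidden_single (house : List (String × List (String × List Int))) : Option String × Option Int :=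
  let total := (PySem.List.pyRange 1 10 1).foldl (fun t num => countFold house num t) PySem.Dict.empty
  let value := hs_select total.items
  hs_locate house value

-- ===== PORT B =====
-- inner 'for c in dict.fromkeys(list(house[key].values())[0]):
--          count[c] = count.get(c, 0) + 1; cell.setdefault(c, key)'
def hs_cell (key : String) (cs : List Int)
    (st : PySem.Dict Int Int × PySem.Dict Int String) :
    PySem.Dict Int Int × PySem.Dict Int String :=
  (PySem.Set.ofList cs).foldl
    (fun st c => (st.1.insert c (st.1.getD c 0 + 1), st.2.setdefault c key)) st

-- the single 'for key in house' pass building (count, cell)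
def hs_scan (house : List (String × List (String × List Int))) :
    PySem.Dict Int Int × PySem.Dict Int String :=
  house.foldl (fun st kv => hs_cell kv.1 (firstCands kv.2) st)
    (PySem.Dict.empty, PySem.Dict.empty)

-- value = next((n for n in range(1, 10) if count.get(n) == 1), 0)
-- return (cell[value], value) if value in cell else (None, None)
def hidden_single_alt (house : List (String × List (String × List Int))) :
    Option String × Option Int :=
  let st := hs_scan house
  let value := ((PySem.List.pyRange 1 10 1).find? (fun n => st.1.get? n = some 1)).getD 0
  match st.2.get? value with
  | some k => (some k, some value)
  | none => (none, none)

-- ===== PRECONDITION & SPEC =====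
-- Pre_ excludes houses with an empty inner dict, on which both Pythons raise IndexError
-- at list(house[key].values())[0].
def Pre_hidden_single (house : List (String × List (String × List Int))) : Prop :=
  ∀ kv ∈ house, kv.2 ≠ []
instance (house : List (String × List (String × List Int))) : Decidable (Pre_hidden_single house) := by unfold Pre_hidden_single; infer_instance
def pvWitness_hidden_single : (List (String × List (String × List Int))) := [("a", [("x", [1])])]

def Spec_hidden_single (house : List (String × List (String × List Int))) (out : Option String × Option Int) : Prop := out = hidden_single_alt house
instance (house : List (String × List (String × List Int))) (out : Option String × Option Int) : Decidable (Spec_hidden_single house out) := by unfold Spec_hidden_single; infer_instance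

-- ===== CLAIM (what is proved, stated in full; the proofs are below) =====
def Claim_equal_hidden_single : Prop := ∀ (house : List (String × List (String × List Int))), Dom_hidden_single house → Pre_hidden_single house → Spec_hidden_single house (hidden_single house)

-- ===== LEMMAS AND PROOFS =====

-- number of cells whose first candidate list contains n
def cnt (house : List (String × List (String × List Int))) (n : Int) : Nat :=
  (house.filter (fun kv => n ∈ firstCands kv.2)).length

-- first n in the list with cnt = 1, else 0 (what A's phases 1+2 compute)
def firstOne (house : List (String × List (String × List Int))) : List Int → Int
  | [] => 0
  | n :: rest => if cnt house n = 1 then n else firstOne house rest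

theorem insert_insert_same (d : PySem.Dict Int Int) (k : Int) (v w : Int) :
    (d.insert k v).insert k w = d.insert k w := by
  apply PySem.Dict.ext
  by_cases h : d.contains k = true
  · rw [PySem.Dict.items_insert_of_contains _ _ (PySem.Dict.contains_insert_self d k v),
        PySem.Dict.items_insert_of_contains _ _ h,
        PySem.Dict.items_insert_of_contains _ _ h, List.map_map]
    apply List.map_congr_left
    intro p _
    by_cases hp : p.1 = k <;> simp [hp]
  · have h' : d.contains k = false := by simpa using h
    have hnk : ∀ p ∈ d.items, p.1 ≠ k := by
      intro p hp hk
      apply h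
      rw [PySem.Dict.contains_eq_decide_mem_keys]
      simp only [decide_eq_true_iff, PySem.Dict.keys]
      exact hk ▸ List.mem_map_of_mem hp
    rw [PySem.Dict.items_insert_of_contains _ _ (PySem.Dict.contains_insert_self d k v),
        PySem.Dict.items_insert_of_not_contains _ _ h',
        PySem.Dict.items_insert_of_not_contains _ _ h',
        List.map_append]
    have hid : List.map (fun p => if (p.1 == k) = true then (k, w) else p) d.items = d.items := by
      conv_rhs => rw [← List.map_id d.items]
      apply List.map_congr_left
      intro p hp
      simp [hnk p hp]
    rw [hid]
    simp

theorem countFold_inserted (house : List (String × List (String × List Int))) (num : Int)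
    (d : PySem.Dict Int Int) (v : Int) :
    countFold house num (d.insert num v) = d.insert num (v + (cnt house num : Int)) := by
  induction house generalizing v with
  | nil => simp [countFold, cnt]
  | cons kv rest ih =>
    by_cases hm : num ∈ firstCands kv.2
    · have h1 : countFold (kv :: rest) num (d.insert num v)
          = countFold rest num ((d.insert num v).insert num (v + 1)) := by
        simp [countFold, hm, PySem.Dict.contains_insert_self, PySem.Dict.getD_insert_self]
      rw [h1, insert_insert_same, ih (v + 1)]
      have h2 : cnt (kv :: rest) num = cnt rest num + 1 := by
        simp [cnt, hm]
      rw [h2]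
      congr 1
      push_cast
      ring
    · have h1 : countFold (kv :: rest) num (d.insert num v)
          = countFold rest num (d.insert num v) := by
        simp [countFold, hm]
      have h2 : cnt (kv :: rest) num = cnt rest num := by
        simp [cnt, hm]
      rw [h1, ih v, h2]

theorem countFold_fresh (house : List (String × List (String × List Int))) (num : Int)
    (total : PySem.Dict Int Int) (h : total.contains num = false) :
    countFold house num total =
      if cnt house num = 0 then total else total.insert num (cnt house num : Int) := by
  induction house with
  | nil => simp [countFold, cnt]
  | cons kv rest ih =>
    by_cases hm : num ∈ firstCands kv.2
    · have h1 : countFold (kv :: rest) num total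
          = countFold rest num (total.insert num 1) := by
        simp [countFold, hm, h]
      have h2 : cnt (kv :: rest) num = cnt rest num + 1 := by
        simp [cnt, hm]
      rw [h1, countFold_inserted, h2]
      rw [if_neg (Nat.succ_ne_zero _)]
      congr 1
      push_cast
      ring
    · have h1 : countFold (kv :: rest) num total
          = countFold rest num total := by
        simp [countFold, hm]
      have h2 : cnt (kv :: rest) num = cnt rest num := by
        simp [cnt, hm]
      rw [h1, ih, h2]

theorem outer_items (house : List (String × List (String × List Int)))
    (nums : List Int) (total : PySem.Dict Int Int)
    (hfresh : ∀ n ∈ nums, total.contains n = false) (hnd : nums.Nodup) :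
    (nums.foldl (fun t num => countFold house num t) total).items =
      total.items ++ nums.filterMap
        (fun n => if cnt house n = 0 then none else some (n, (cnt house n : Int))) := by
  induction nums generalizing total with
  | nil => simp
  | cons n rest ih =>
    have hn : total.contains n = false := hfresh n List.mem_cons_self
    simp only [List.foldl_cons]
    rw [countFold_fresh house n total hn]
    by_cases hc : cnt house n = 0
    · rw [if_pos hc, ih total (fun m hm => hfresh m (List.mem_cons_of_mem _ hm))
          (List.nodup_cons.mp hnd).2]
      simp [hc]
    · rw [if_neg hc]
      have hfresh' : ∀ m ∈ rest, (total.insert n (cnt house n : Int)).contains m = false := by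
        intro m hm
        rw [PySem.Dict.contains_insert]
        have hmn : m ≠ n := by
          rintro rfl
          exact (List.nodup_cons.mp hnd).1 hm
        simp [hmn, hfresh m (List.mem_cons_of_mem _ hm)]
      rw [ih _ hfresh' (List.nodup_cons.mp hnd).2,
          PySem.Dict.items_insert_of_not_contains _ _ hn]
      simp [hc]

theorem select_filterMap (house : List (String × List (String × List Int))) (nums : List Int) :
    hs_select (nums.filterMap
        (fun n => if cnt house n = 0 then none else some (n, (cnt house n : Int)))) =
      firstOne house nums := by
  induction nums with
  | nil => simp [hs_select, firstOne]
  | cons n rest ih =>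
    by_cases hc : cnt house n = 0
    · have h1 : cnt house n ≠ 1 := by omega
      simp [firstOne, hc, ih]
    · by_cases h1 : cnt house n = 1
      · simp [firstOne, h1, hs_select]
      · have h1' : (cnt house n : Int) ≠ 1 := by
          intro hx
          exact h1 (by exact_mod_cast hx)
        simp [firstOne, hc, h1, h1', hs_select, ih]

theorem hidden_single_eq_locate (house : List (String × List (String × List Int))) :
    hidden_single house = hs_locate house (firstOne house [1, 2, 3, 4, 5, 6, 7, 8, 9]) := by
  have hr : PySem.List.pyRange 1 10 1 = [1, 2, 3, 4, 5, 6, 7, 8, 9] := by decide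
  have hfresh : ∀ n ∈ ([1, 2, 3, 4, 5, 6, 7, 8, 9] : List Int),
      (PySem.Dict.empty : PySem.Dict Int Int).contains n = false := by
    intro n _
    simp [PySem.Dict.contains_empty]
  have hnd : ([1, 2, 3, 4, 5, 6, 7, 8, 9] : List Int).Nodup := by decide
  show hs_locate house (hs_select ((List.foldl (fun t num => countFold house num t)
      PySem.Dict.empty (PySem.List.pyRange 1 10 1)).items)) = _
  rw [hr, outer_items house _ _ hfresh hnd]
  have he : (PySem.Dict.empty : PySem.Dict Int Int).items = [] := rfl
  rw [he, List.nil_append, select_filterMap]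

theorem find_eq_firstOne (house : List (String × List (String × List Int))) (nums : List Int) :
    ((nums.find? (fun n => cnt house n = 1)).getD 0) = firstOne house nums := by
  induction nums with
  | nil => rfl
  | cons n rest ih =>
    by_cases h1 : cnt house n = 1
    · simp [h1, firstOne]
    · simp only [List.find?_cons, firstOne, if_neg h1]
      rw [(by simpa using h1 : (decide (cnt house n = 1)) = false)]
      exact ih

-- ----- B-side lemmas -----

-- the two components of B's per-cell fold do not interact
theorem hs_cell_components (key : String) (l : List Int)
    (st : PySem.Dict Int Int × PySem.Dict Int String) :
    (PySem.Set.ofList l).foldl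
        (fun st c => (st.1.insert c (st.1.getD c 0 + 1), st.2.setdefault c key)) st =
      ((PySem.Set.ofList l).foldl (fun d c => d.insert c (d.getD c 0 + 1)) st.1,
       (PySem.Set.ofList l).foldl (fun d c => d.setdefault c key) st.2) := by
  generalize PySem.Set.ofList l = m
  induction m generalizing st with
  | nil => rfl
  | cons c rest ih => exact ih _

theorem cell_count_get? (l : List Int) (hnd : l.Nodup) (d : PySem.Dict Int Int) (n : Int) :
    (l.foldl (fun d c => d.insert c (d.getD c 0 + 1)) d).get? n =
      if n ∈ l then some (d.getD n 0 + 1) else d.get? n := by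
  induction l generalizing d with
  | nil => simp
  | cons c rest ih =>
    rcases List.nodup_cons.mp hnd with ⟨hcr, hrest⟩
    simp only [List.foldl_cons]
    by_cases hcn : c = n
    · subst hcn
      rw [ih hrest, if_neg (fun h => hcr h), PySem.Dict.get?_insert_self]
      simp
    · rw [ih hrest]
      by_cases hm : n ∈ rest
      · rw [if_pos hm, if_pos (List.mem_cons_of_mem _ hm),
            PySem.Dict.getD_insert, if_neg (Ne.symm hcn)]
      · have hnm : n ∉ c :: rest := by
          simp [hm, Ne.symm hcn]
        rw [if_neg hm, if_neg hnm, PySem.Dict.get?_insert, if_neg (Ne.symm hcn)]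

theorem cell_fk_get? (key : String) (l : List Int) (hnd : l.Nodup)
    (d : PySem.Dict Int String) (n : Int) :
    (l.foldl (fun d c => d.setdefault c key) d).get? n =
      (d.get? n).or (if n ∈ l then some key else none) := by
  induction l generalizing d with
  | nil => simp
  | cons c rest ih =>
    rcases List.nodup_cons.mp hnd with ⟨hcr, hrest⟩
    simp only [List.foldl_cons]
    by_cases hcn : c = n
    · subst hcn
      rw [ih hrest, if_neg (fun h => hcr h)]
      rw [PySem.Dict.get?_setdefault_self]
      cases h : d.get? c
      · simp
      · simp
    · have hget : (d.setdefault c key).get? n = d.get? n := by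
        by_cases hc : d.contains c = true
        · rw [PySem.Dict.setdefault_of_contains _ _ hc]
        · rw [PySem.Dict.setdefault_of_not_contains _ _ (by simpa using hc),
              PySem.Dict.get?_insert, if_neg (Ne.symm hcn)]
      rw [ih hrest, hget]
      by_cases hm : n ∈ rest
      · rw [if_pos hm, if_pos (List.mem_cons_of_mem _ hm)]
      · have hnm : n ∉ c :: rest := by
          simp [hm, Ne.symm hcn]
        rw [if_neg hm, if_neg hnm]

theorem scan_count_get? (house : List (String × List (String × List Int)))
    (d : PySem.Dict Int Int) (n : Int) :
    (house.foldl (fun d kv =>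
        (PySem.Set.ofList (firstCands kv.2)).foldl
          (fun d c => d.insert c (d.getD c 0 + 1)) d) d).get? n =
      if cnt house n = 0 then d.get? n else some (d.getD n 0 + (cnt house n : Int)) := by
  induction house generalizing d with
  | nil => simp [cnt]
  | cons kv rest ih =>
    simp only [List.foldl_cons]
    rw [ih]
    have hcell := cell_count_get? (PySem.Set.ofList (firstCands kv.2))
      (PySem.Set.nodup_ofList _) d n
    have hmem : (n ∈ PySem.Set.ofList (firstCands kv.2)) ↔ n ∈ firstCands kv.2 :=
      PySem.Set.mem_ofList _ _
    by_cases hm : n ∈ firstCands kv.2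
    · have h2 : cnt (kv :: rest) n = cnt rest n + 1 := by simp [cnt, hm]
      have hg : ((PySem.Set.ofList (firstCands kv.2)).foldl
          (fun d c => d.insert c (d.getD c 0 + 1)) d).get? n = some (d.getD n 0 + 1) := by
        rw [hcell, if_pos (hmem.mpr hm)]
      have hgD : ((PySem.Set.ofList (firstCands kv.2)).foldl
          (fun d c => d.insert c (d.getD c 0 + 1)) d).getD n 0 = d.getD n 0 + 1 := by
        rw [PySem.Dict.getD_eq_get?_getD, hg]
        rfl
      by_cases hc : cnt rest n = 0
      · rw [if_pos hc, hg, h2, hc, if_neg (by omega)]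
        simp
      · rw [if_neg hc, hgD, h2, if_neg (by omega)]
        congr 1
        push_cast
        ring
    · have h2 : cnt (kv :: rest) n = cnt rest n := by simp [cnt, hm]
      have hg : ((PySem.Set.ofList (firstCands kv.2)).foldl
          (fun d c => d.insert c (d.getD c 0 + 1)) d).get? n = d.get? n := by
        rw [hcell, if_neg (fun h => hm (hmem.mp h))]
      have hgD : ((PySem.Set.ofList (firstCands kv.2)).foldl
          (fun d c => d.insert c (d.getD c 0 + 1)) d).getD n 0 = d.getD n 0 := by
        rw [PySem.Dict.getD_eq_get?_getD, hg, PySem.Dict.getD_eq_get?_getD]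
      rw [h2, hg, hgD]

theorem scan_fk_get? (house : List (String × List (String × List Int)))
    (d : PySem.Dict Int String) (n : Int) :
    (house.foldl (fun d kv =>
        (PySem.Set.ofList (firstCands kv.2)).foldl
          (fun d c => d.setdefault c kv.1) d) d).get? n =
      (d.get? n).or ((house.find? (fun kv => n ∈ firstCands kv.2)).map Prod.fst) := by
  induction house generalizing d with
  | nil => simp
  | cons kv rest ih =>
    simp only [List.foldl_cons]
    rw [ih]
    have hcell := cell_fk_get? kv.1 (PySem.Set.ofList (firstCands kv.2))
      (PySem.Set.nodup_ofList _) d n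
    have hmem : (n ∈ PySem.Set.ofList (firstCands kv.2)) ↔ n ∈ firstCands kv.2 :=
      PySem.Set.mem_ofList _ _
    by_cases hm : n ∈ firstCands kv.2
    · rw [hcell, if_pos (hmem.mpr hm)]
      rw [List.find?_cons_of_pos (by simpa using hm)]
      cases d.get? n <;> simp
    · rw [hcell, if_neg (fun h => hm (hmem.mp h))]
      rw [List.find?_cons_of_neg (by simpa using hm)]
      cases d.get? n <;> simp

theorem hs_scan_pair (house : List (String × List (String × List Int)))
    (c0 : PySem.Dict Int Int) (f0 : PySem.Dict Int String) :
    house.foldl (fun st kv => hs_cell kv.1 (firstCands kv.2) st) (c0, f0) =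
      (house.foldl (fun d kv =>
        (PySem.Set.ofList (firstCands kv.2)).foldl
          (fun d c => d.insert c (d.getD c 0 + 1)) d) c0,
       house.foldl (fun d kv =>
        (PySem.Set.ofList (firstCands kv.2)).foldl
          (fun d c => d.setdefault c kv.1) d) f0) := by
  induction house generalizing c0 f0 with
  | nil => rfl
  | cons kv rest ih =>
    simp only [List.foldl_cons, hs_cell]
    rw [hs_cell_components]
    exact ih _ _

theorem hs_scan_eq (house : List (String × List (String × List Int))) :
    hs_scan house =
      (house.foldl (fun d kv =>
        (PySem.Set.ofList (firstCands kv.2)).foldl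
          (fun d c => d.insert c (d.getD c 0 + 1)) d) PySem.Dict.empty,
       house.foldl (fun d kv =>
        (PySem.Set.ofList (firstCands kv.2)).foldl
          (fun d c => d.setdefault c kv.1) d) PySem.Dict.empty) :=
  hs_scan_pair house _ _

theorem find_eq_locate (house : List (String × List (String × List Int))) (v : Int) :
    (match (house.find? (fun kv => v ∈ firstCands kv.2)).map Prod.fst with
      | some k => (some k, some v)
      | none => ((none, none) : Option String × Option Int)) = hs_locate house v := by
  induction house with
  | nil => rfl
  | cons kv rest ih =>
    by_cases hm : v ∈ firstCands kv.2
    · rw [List.find?_cons_of_pos (by simpa using hm)]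
      simp [hs_locate, hm]
    · rw [List.find?_cons_of_neg (by simpa using hm)]
      simp only [hs_locate, if_neg hm]
      exact ih

theorem alt_char (house : List (String × List (String × List Int))) :
    hidden_single_alt house = hs_locate house (firstOne house [1, 2, 3, 4, 5, 6, 7, 8, 9]) := by
  have hr : PySem.List.pyRange 1 10 1 = [1, 2, 3, 4, 5, 6, 7, 8, 9] := by decide
  have hpred : (fun n => decide ((hs_scan house).1.get? n = some 1))
      = (fun n => decide (cnt house n = 1)) := by
    funext n
    rw [hs_scan_eq]
    simp only
    rw [scan_count_get? house PySem.Dict.empty n]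
    by_cases hc : cnt house n = 0
    · rw [if_pos hc, PySem.Dict.get?_empty]
      simp [hc]
    · rw [if_neg hc, PySem.Dict.getD_empty]
      have : (0 + (cnt house n : Int) = 1) ↔ cnt house n = 1 := by
        constructor
        · intro h
          exact_mod_cast (by omega : (cnt house n : Int) = 1)
        · intro h
          rw [h]
          norm_num
      simp only [decide_eq_decide]
      constructor
      · intro h
        exact this.mp (Option.some_injective _ h)
      · intro h
        rw [this.mpr h]
  show (match (hs_scan house).2.get? (((PySem.List.pyRange 1 10 1).find?
        (fun n => (hs_scan house).1.get? n = some 1)).getD 0) with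
      | some k => (some k, some (((PySem.List.pyRange 1 10 1).find?
          (fun n => (hs_scan house).1.get? n = some 1)).getD 0))
      | none => ((none, none) : Option String × Option Int)) = _
  rw [hr]
  have hval : (([1, 2, 3, 4, 5, 6, 7, 8, 9] : List Int).find?
      (fun n => (hs_scan house).1.get? n = some 1)).getD 0
      = firstOne house [1, 2, 3, 4, 5, 6, 7, 8, 9] := by
    rw [show (fun n => decide ((hs_scan house).1.get? n = some 1))
        = (fun n => decide (cnt house n = 1)) from hpred]
    exact find_eq_firstOne house _
  rw [hval]
  have hfk : (hs_scan house).2.get? (firstOne house [1, 2, 3, 4, 5, 6, 7, 8, 9])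
      = (house.find? (fun kv =>
          firstOne house [1, 2, 3, 4, 5, 6, 7, 8, 9] ∈ firstCands kv.2)).map Prod.fst := by
    rw [hs_scan_eq]
    simp only
    rw [scan_fk_get?, PySem.Dict.get?_empty, Option.none_or]
  rw [hfk, find_eq_locate]

-- ===== VERDICT (by name: the statement is the Claim_ definition above) =====
theorem hidden_single_spec : Claim_equal_hidden_single := by
  intro house _ _
  show hidden_single house = hidden_single_alt house
  rw [hidden_single_eq_locate, alt_char]
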